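-- pv_equiv track=rewrite | github.com/awilkins/advent | python/advent/day_12/climbing.py | parse_chart
-- ===== SOURCE A (Python) =====
-- from typing import List
--
-- def parse_chart(lines: List[str]):
--     chart = []
--     start = (0, 0)
--     end = (0, 0)
--     for iy, line in enumerate(lines):
--         row = []
--         chart.append(row)
--         for ix, c in enumerate(line):
--
--             if 'S' == c:
--                 start = (ix, iy)
--                 c = 'a'
--
--             if 'E' == c:
--                 end = (ix, iy)
--                 c = 'z'
--
--             height = ord(c)
--             row.append(height)
--
--     return chart, start, end
-- ===== SOURCE B (Python) =====
-- from typing import List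
--
--
-- def parse_chart(lines: List[str]):
--     chart = [[ord('a' if c == 'S' else 'z' if c == 'E' else c) for c in line]
--              for line in lines]
--     start = end = (0, 0)
--     for iy, line in enumerate(lines):
--         for ix, c in enumerate(line):
--             if c == 'S':
--                 start = (ix, iy)
--             elif c == 'E':
--                 end = (ix, iy)
--     return chart, start, end
-- ===== Notes on version B (the rewrite author's own statement) =====
-- stated objective: alternative
-- what changed: Replaces A's single stateful pass (building each row while threading start/end through the same loop, mutating the character variable) by a pure nested comprehension for the grid plus a separate plain scan that records the marker positions.
import Mathlib
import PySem

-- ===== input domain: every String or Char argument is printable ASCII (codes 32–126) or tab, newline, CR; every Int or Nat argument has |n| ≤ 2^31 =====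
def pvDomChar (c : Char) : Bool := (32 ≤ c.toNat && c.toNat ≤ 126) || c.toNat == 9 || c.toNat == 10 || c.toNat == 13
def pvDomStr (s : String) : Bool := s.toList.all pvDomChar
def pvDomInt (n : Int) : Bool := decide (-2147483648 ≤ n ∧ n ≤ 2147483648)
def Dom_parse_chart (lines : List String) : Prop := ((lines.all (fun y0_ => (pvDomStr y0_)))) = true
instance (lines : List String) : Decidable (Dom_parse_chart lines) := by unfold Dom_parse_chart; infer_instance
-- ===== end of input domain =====

-- B separates A's single stateful pass into a pure grid comprehension plus a plain
-- marker-position scan (alternative decomposition, same cost).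

-- ===== PORT A =====
-- one character step of A's inner loop: the two sequential 'if's, then append the height
def pcStepC (iy : Int) (st2 : List Int × (Int × Int) × (Int × Int)) (q : Int × Char) :
    List Int × (Int × Int) × (Int × Int) :=
  let ix := q.1
  let c := q.2
  let sc : (Int × Int) × Char := if c = 'S' then ((ix, iy), 'a') else (st2.2.1, c)
  let ec : (Int × Int) × Char := if sc.2 = 'E' then ((ix, iy), 'z') else (st2.2.2, sc.2)
  (st2.1 ++ [(ec.2.toNat : Int)], sc.1, ec.1)

-- one line step of A's outer loop (the row is built by the inner loop, then appended)
def pcStepL (st : List (List Int) × (Int × Int) × (Int × Int)) (p : Int × String) :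
    List (List Int) × (Int × Int) × (Int × Int) :=
  let iy := p.1
  let r := (PySem.List.enumerate p.2.toList 0).foldl (pcStepC iy) ([], st.2.1, st.2.2)
  (st.1 ++ [r.1], r.2.1, r.2.2)

def parse_chart (lines : List String) : List (List Int) × (Int × Int) × (Int × Int) :=
  (PySem.List.enumerate lines 0).foldl pcStepL ([], (0, 0), (0, 0))

-- ===== PORT B =====
def pcAltHeight (c : Char) : Int :=
  ((if c = 'S' then 'a' else if c = 'E' then 'z' else c).toNat : Int)

-- Source B's inner loop body: record a marker position (if/elif)
def pcPosStepC (iy : Int) (pe : (Int × Int) × (Int × Int)) (q : Int × Char) :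
    (Int × Int) × (Int × Int) :=
  if q.2 = 'S' then ((q.1, iy), pe.2)
  else if q.2 = 'E' then (pe.1, (q.1, iy))
  else pe

-- Source B's outer loop over enumerate(lines)
def pcPosStepL (pe : (Int × Int) × (Int × Int)) (p : Int × String) :
    (Int × Int) × (Int × Int) :=
  (PySem.List.enumerate p.2.toList 0).foldl (pcPosStepC p.1) pe

def parse_chart_alt (lines : List String) : List (List Int) × (Int × Int) × (Int × Int) :=
  (lines.map (fun line => line.toList.map pcAltHeight),
   (PySem.List.enumerate lines 0).foldl pcPosStepL ((0, 0), (0, 0)))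

-- ===== PRECONDITION & SPEC =====
def Spec_parse_chart (lines : List String) (out : List (List Int) × (Int × Int) × (Int × Int)) : Prop := out = parse_chart_alt lines
instance (lines : List String) (out : List (List Int) × (Int × Int) × (Int × Int)) : Decidable (Spec_parse_chart lines out) := by unfold Spec_parse_chart; infer_instance

-- ===== CLAIM =====
def Claim_equal_parse_chart : Prop := ∀ (lines : List String), Dom_parse_chart lines → Spec_parse_chart lines (parse_chart lines)

-- ===== LEMMAS AND PROOFS =====

theorem pcStepC_eq (iy ix : Int) (c : Char) (row : List Int) (pe : (Int × Int) × (Int × Int)) :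
    pcStepC iy (row, pe) (ix, c)
      = (row ++ [pcAltHeight c], pcPosStepC iy pe (ix, c)) := by
  by_cases hS : c = 'S' <;> by_cases hE : c = 'E' <;>
    simp_all [pcStepC, pcPosStepC, pcAltHeight]

theorem pc_inner (iy : Int) (cs : List Char) :
    ∀ (ix0 : Int) (row : List Int) (pe : (Int × Int) × (Int × Int)),
    (PySem.List.enumerate cs ix0).foldl (pcStepC iy) (row, pe)
      = (row ++ cs.map pcAltHeight,
         (PySem.List.enumerate cs ix0).foldl (pcPosStepC iy) pe) := by
  induction cs with
  | nil => intro ix0 row pe; simp [PySem.List.enumerate_nil]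
  | cons c cs ih =>
    intro ix0 row pe
    rw [PySem.List.enumerate_cons]
    simp only [List.foldl_cons, pcStepC_eq, ih, List.map_cons, List.append_assoc,
      List.singleton_append]

theorem pc_outer (ls : List String) :
    ∀ (iy0 : Int) (ch : List (List Int)) (pe : (Int × Int) × (Int × Int)),
    (PySem.List.enumerate ls iy0).foldl pcStepL (ch, pe)
      = (ch ++ ls.map (fun line => line.toList.map pcAltHeight),
         (PySem.List.enumerate ls iy0).foldl pcPosStepL pe) := by
  induction ls with
  | nil => intro iy0 ch pe; simp [PySem.List.enumerate_nil]
  | cons l ls ih =>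
    intro iy0 ch pe
    rw [PySem.List.enumerate_cons]
    simp only [List.foldl_cons]
    have hstep : pcStepL (ch, pe) (iy0, l)
        = (ch ++ [l.toList.map pcAltHeight], pcPosStepL pe (iy0, l)) := by
      simp [pcStepL, pcPosStepL, pc_inner]
    rw [hstep, ih]
    simp

-- ===== VERDICT =====
theorem parse_chart_spec : Claim_equal_parse_chart := by
  intro lines _
  show parse_chart lines = parse_chart_alt lines
  simpa [parse_chart, parse_chart_alt] using pc_outer lines 0 [] ((0,0),(0,0))
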